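-- pv_equiv track=rewrite | github.com/lilei1/Rosalind | python_practice/enu_kmer_lexi_recursive_self.py | kmer_enu
-- ===== SOURCE A (Python) =====
-- def kmer_enu(k,alphabet):
-- 	kmers = []
-- 	if k == 0:
-- 		return ['']
-- 	else:
-- 		for base in alphabet:
-- 			for kmer in kmer_enu(k-1, alphabet):
-- 				kmers.append(base+kmer)
-- 		return kmers
-- ===== SOURCE B (Python) =====
-- def kmer_enu(k, alphabet):
--     # Iterative bottom-up build: extend each kmer level once instead of
--     # recomputing the (k-1)-level recursively for every base.
--     if k < 0:
--         raise ValueError("k must be non-negative")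
--     kmers = ['']
--     for _ in range(k):
--         kmers = [base + kmer for base in alphabet for kmer in kmers]
--         if not kmers:  # empty alphabet: no k-mers, stop early
--             break
--     return kmers
-- ===== Notes on version B (the rewrite author's own statement) =====
-- stated objective: alternative
-- what changed: Replaces the recursion that recomputes kmer_enu(k-1) for every base with a single iterative bottom-up build of the levels (intended to avoid the recomputation; measured 3.33x at the largest size both finished, unconfirmed at larger sizes where both exhaust memory).
-- outside the precondition, e.g. on kmer_enu(-34, ''): A returns [], B raises ValueError
import Mathlib
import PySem

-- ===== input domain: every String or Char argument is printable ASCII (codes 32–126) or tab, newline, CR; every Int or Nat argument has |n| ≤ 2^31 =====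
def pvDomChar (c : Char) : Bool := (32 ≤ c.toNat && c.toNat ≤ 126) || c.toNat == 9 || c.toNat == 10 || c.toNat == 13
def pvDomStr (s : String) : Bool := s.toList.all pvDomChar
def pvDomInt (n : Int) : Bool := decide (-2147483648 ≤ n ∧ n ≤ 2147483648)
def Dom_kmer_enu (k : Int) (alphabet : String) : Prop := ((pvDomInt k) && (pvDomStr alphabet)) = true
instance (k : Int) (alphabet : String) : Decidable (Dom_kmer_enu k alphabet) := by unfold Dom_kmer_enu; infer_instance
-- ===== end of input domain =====

-- B replaces A's recursion (which recomputes the (k-1)-level for every base) by one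
-- iterative bottom-up build of the levels (stopping early once the level is empty);
-- equivalence of return values proved for k ≥ 0 (for k < 0 both Pythons raise, outside Pre_).


-- ===== PORT A =====
-- A recurses with k-1 until k == 0; for negative k Python never terminates (RecursionError),
-- so those inputs lie outside Pre_ and the recursion is transliterated on a Nat fuel k.toNat.
def kmerAuxA : Nat → String → List String
  | 0, _ => [""]
  | n+1, a =>
    -- for base in alphabet: for kmer in kmer_enu(k-1, alphabet): kmers.append(base+kmer)
    a.toList.foldl (fun kmers base =>
      (kmerAuxA n a).foldl (fun ks kmer => ks ++ [String.singleton base ++ kmer]) kmers) []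

def kmer_enu (k : Int) (alphabet : String) : List String :=
  kmerAuxA k.toNat alphabet

-- ===== PORT B =====
-- for _ in range(k): kmers = [base + kmer for base in alphabet for kmer in kmers];
--                    if not kmers: break
def kmerAuxB (a : String) : Nat → List String → List String
  | 0, kmers => kmers
  | n+1, kmers =>
    let kmers' := a.toList.flatMap (fun base => kmers.map (fun kmer => String.singleton base ++ kmer))
    if kmers' = [] then kmers' else kmerAuxB a n kmers'

-- if k < 0: raise ValueError  (no value; outside Pre_, transliterated as [])
-- kmers = ['']; <the range(k) loop above>; return kmers
def kmer_enu_alt (k : Int) (alphabet : String) : List String :=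
  if k < 0 then []  -- raise ValueError: no value, outside Pre_
  else kmerAuxB alphabet k.toNat [""]

-- ===== PRECONDITION & SPEC =====
-- Pre_ excludes k < 0: there Python A raises RecursionError for any non-empty alphabet, and for
-- an empty alphabet returns [] only by accident of the short-circuited loop; B raises ValueError.
def Pre_kmer_enu (k : Int) (alphabet : String) : Prop := 0 ≤ k
instance (k : Int) (alphabet : String) : Decidable (Pre_kmer_enu k alphabet) := by unfold Pre_kmer_enu; infer_instance
def pvWitness_kmer_enu : Int × String := (2, "ab")

def Spec_kmer_enu (k : Int) (alphabet : String) (out : List String) : Prop := out = kmer_enu_alt k alphabet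
instance (k : Int) (alphabet : String) (out : List String) : Decidable (Spec_kmer_enu k alphabet out) := by unfold Spec_kmer_enu; infer_instance

-- ===== CLAIM (what is proved, stated in full; the proofs are below) =====
def Claim_equal_kmer_enu : Prop := ∀ (k : Int) (alphabet : String), Dom_kmer_enu k alphabet → Pre_kmer_enu k alphabet → Spec_kmer_enu k alphabet (kmer_enu k alphabet)

-- ===== LEMMAS AND PROOFS =====

-- B's one level step.
def stepB (a : String) (kmers : List String) : List String :=
  a.toList.flatMap (fun base => kmers.map (fun kmer => String.singleton base ++ kmer))

theorem stepB_nil (a : String) : stepB a [] = [] := by simp [stepB]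

-- An empty level stays empty under iteration.
theorem iterate_stepB_nil (a : String) (n : Nat) : (stepB a)^[n] [] = [] := by
  induction n with
  | zero => rfl
  | succ n ih => rw [Function.iterate_succ_apply, stepB_nil, ih]

-- B's loop (with its early break) computes n iterations of the step.
theorem kmerAuxB_eq_iterate (a : String) (n : Nat) (kmers : List String) :
    kmerAuxB a n kmers = (stepB a)^[n] kmers := by
  induction n generalizing kmers with
  | zero => rfl
  | succ n ih =>
    show (if stepB a kmers = [] then stepB a kmers else kmerAuxB a n (stepB a kmers)) = _
    rw [Function.iterate_succ_apply]
    by_cases h : stepB a kmers = []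
    · rw [if_pos h, h, iterate_stepB_nil]
    · rw [if_neg h, ih]

-- A's level n equals n applications of B's step to [""].
theorem kmerAuxA_eq_iterate (n : Nat) (a : String) :
    kmerAuxA n a = (stepB a)^[n] [""] := by
  induction n with
  | zero => rfl
  | succ n ih =>
    rw [Function.iterate_succ_apply', ← ih]
    show a.toList.foldl _ [] = stepB a (kmerAuxA n a)
    have inner : ∀ (base : Char) (ks : List String),
        (kmerAuxA n a).foldl (fun ks kmer => ks ++ [String.singleton base ++ kmer]) ks
          = ks ++ (kmerAuxA n a).map (fun kmer => String.singleton base ++ kmer) := by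
      intro base ks
      exact PySem.List.foldl_append_singleton_eq_map _ _ _
    calc a.toList.foldl (fun kmers base =>
            (kmerAuxA n a).foldl (fun ks kmer => ks ++ [String.singleton base ++ kmer]) kmers) []
        = a.toList.foldl (fun kmers base =>
            kmers ++ (kmerAuxA n a).map (fun kmer => String.singleton base ++ kmer)) [] := by
          exact PySem.List.foldl_congr_mem _ _ _ _ (fun kmers base hm => inner base kmers)
      _ = [] ++ a.toList.flatMap (fun base =>
            (kmerAuxA n a).map (fun kmer => String.singleton base ++ kmer)) :=
          PySem.List.foldl_append_eq_flatMap _ _ _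
      _ = stepB a (kmerAuxA n a) := by simp [stepB]

-- ===== VERDICT (by name: the statement is the Claim_ definition above) =====
theorem kmer_enu_spec : Claim_equal_kmer_enu := by
  intro k a _ hk
  have h0 : (0:Int) ≤ k := hk
  show kmer_enu k a = kmer_enu_alt k a
  unfold kmer_enu kmer_enu_alt
  rw [if_neg (by omega : ¬ k < 0), kmerAuxA_eq_iterate, kmerAuxB_eq_iterate]
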